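-- pv_equiv track=rewrite | github.com/litespakla/Git_Projects | Project_Euler_Solutions/p51.py | check_repeated_chars
-- ===== SOURCE A (Python) =====
-- def check_repeated_chars(string):
--     counts = {}
--     repeated = []
--     for i, char in enumerate(string):
--         if char in counts:
--             counts[char].append(i)
--             if char not in repeated:
--                 repeated.append(char)
--         else:
--             counts[char] = [i]
--     return [counts[char] for char in repeated]
-- ===== SOURCE B (Python) =====
-- def check_repeated_chars(string):
--     positions = {}
--     for i, char in enumerate(string):
--         positions.setdefault(char, []).append(i)
--     repeats = [p for p in positions.values() if len(p) >= 2]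
--     repeats.sort(key=lambda p: p[1])
--     return repeats
-- ===== Notes on version B (the rewrite author's own statement) =====
-- stated objective: alternative
-- what changed: Replaces A's fused scan that maintains the first-repeat order inline (with a linear 'char not in repeated' scan per repeated occurrence) by a plain position-table build followed by a filter of the count>=2 lists and a sort by each list's second index.
import Mathlib
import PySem

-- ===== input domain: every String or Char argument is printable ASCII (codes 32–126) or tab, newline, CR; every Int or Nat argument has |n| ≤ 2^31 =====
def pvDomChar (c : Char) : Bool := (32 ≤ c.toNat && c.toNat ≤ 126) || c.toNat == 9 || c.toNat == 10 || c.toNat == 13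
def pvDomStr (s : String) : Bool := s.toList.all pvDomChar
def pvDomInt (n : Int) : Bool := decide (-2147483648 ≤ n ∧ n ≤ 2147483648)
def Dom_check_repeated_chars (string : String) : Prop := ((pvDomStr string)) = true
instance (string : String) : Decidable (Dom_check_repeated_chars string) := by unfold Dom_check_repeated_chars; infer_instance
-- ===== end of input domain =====

-- B replaces A's fused single scan (which keeps the first-repeat order inline via a linear
-- 'char not in repeated' scan) by a position-table build, a count>=2 filter and a sort by
-- each list's second index.

-- ===== PORT A =====
def check_repeated_chars (string : String) : List (List Int) :=
  let st := (PySem.List.enumerate string.toList 0).foldl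
    (fun (st : PySem.Dict Char (List Int) × List Char) ic =>
      if st.1.contains ic.2 then
        (st.1.modify ic.2 [] (fun v => v ++ [ic.1]),
         if ic.2 ∈ st.2 then st.2 else st.2 ++ [ic.2])
      else
        (st.1.insert ic.2 [ic.1], st.2))
    (PySem.Dict.empty, [])
  st.2.map (fun c => st.1.getD c [])

-- ===== PORT B =====
def check_repeated_chars_alt (string : String) : List (List Int) :=
  let positions := (PySem.List.enumerate string.toList 0).foldl
    (fun (d : PySem.Dict Char (List Int)) ic => d.modify ic.2 [] (fun v => v ++ [ic.1]))
    PySem.Dict.empty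
  let repeats := positions.values.filter (fun p => 2 ≤ PySem.List.len p)
  PySem.List.sorted repeats (fun p => PySem.List.pyGetD p 1 0) false

-- ===== PRECONDITION & SPEC =====
def Spec_check_repeated_chars (string : String) (out : List (List Int)) : Prop := out = check_repeated_chars_alt string
instance (string : String) (out : List (List Int)) : Decidable (Spec_check_repeated_chars string out) := by unfold Spec_check_repeated_chars; infer_instance

-- ===== CLAIM (what is proved, stated in full; the proofs are below) =====
def Claim_equal_check_repeated_chars : Prop := ∀ (string : String), Dom_check_repeated_chars string → Spec_check_repeated_chars string (check_repeated_chars string)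

-- ===== LEMMAS AND PROOFS =====

def posOf (l : List Char) (c : Char) : List Int :=
  ((PySem.List.enumerate l 0).filter (fun q => q.2 == c)).map (fun q => q.1)
theorem posOf_append_singleton (l : List Char) (x c : Char) :
    posOf (l ++ [x]) c = posOf l c ++ (if x = c then [(l.length : Int)] else []) := by
  unfold posOf
  rw [PySem.List.enumerate_append, List.filter_append, List.map_append]
  congr 1
  simp [PySem.List.enumerate_cons, PySem.List.enumerate_nil]
  split_ifs with h <;> simp [h]
theorem length_posOf (l : List Char) (c : Char) : (posOf l c).length = l.count c := by
  unfold posOf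
  rw [List.length_map, ← List.countP_eq_length_filter]
  have := PySem.List.map_snd_enumerate l (0:Int)
  conv_rhs => rw [← this]
  rw [List.count_eq_countP, List.countP_map]
  rfl
theorem mem_posOf_lt (l : List Char) (c : Char) (i : Int) (h : i ∈ posOf l c) :
    0 ≤ i ∧ i < l.length := by
  unfold posOf at h
  simp only [List.mem_map, List.mem_filter] at h
  obtain ⟨q, ⟨hq, _⟩, rfl⟩ := h
  rw [PySem.List.mem_enumerate_iff] at hq
  obtain ⟨k, hk, rfl⟩ := hq
  constructor <;> [positivity; omega]
theorem pyGetD_one_append (a b : List Int) (h : 2 ≤ a.length) :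
    PySem.List.pyGetD (a ++ b) 1 0 = PySem.List.pyGetD a 1 0 := by
  have h1 : ((1:Nat) : Int) = (1 : Int) := rfl
  rw [← h1, PySem.List.pyGetD_natCast, PySem.List.pyGetD_natCast]
  rw [List.getD_eq_getElem?_getD, List.getD_eq_getElem?_getD, List.getElem?_append_left (by omega)]
theorem pyGetD_one_mem (a : List Int) (h : 2 ≤ a.length) :
    PySem.List.pyGetD a 1 0 ∈ a := by
  have h1 : ((1:Nat) : Int) = (1 : Int) := rfl
  rw [← h1, PySem.List.pyGetD_natCast]
  rw [List.getD_eq_getElem?_getD, List.getElem?_eq_getElem (by omega)]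
  simp


def Astep (st : PySem.Dict Char (List Int) × List Char) (ic : Int × Char) :
    PySem.Dict Char (List Int) × List Char :=
  if st.1.contains ic.2 then
    (st.1.modify ic.2 [] (fun v => v ++ [ic.1]),
     if ic.2 ∈ st.2 then st.2 else st.2 ++ [ic.2])
  else
    (st.1.insert ic.2 [ic.1], st.2)

theorem A_inv (l : List Char) :
    (∀ c, ((PySem.List.enumerate l 0).foldl Astep (PySem.Dict.empty, [])).1.getD c [] = posOf l c) ∧
    (∀ c, ((PySem.List.enumerate l 0).foldl Astep (PySem.Dict.empty, [])).1.contains c = l.contains c) ∧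
    (∀ c, c ∈ ((PySem.List.enumerate l 0).foldl Astep (PySem.Dict.empty, [])).2 ↔ 2 ≤ l.count c) ∧
    ((PySem.List.enumerate l 0).foldl Astep (PySem.Dict.empty, [])).2.Nodup ∧
    ((PySem.List.enumerate l 0).foldl Astep (PySem.Dict.empty, [])).2.Pairwise
      (fun a b => PySem.List.pyGetD (posOf l a) 1 0 < PySem.List.pyGetD (posOf l b) 1 0) := by
  induction l using List.reverseRecOn with
  | nil =>
    refine ⟨fun c => ?_, fun c => ?_, fun c => ?_, ?_, ?_⟩ <;>
      simp [PySem.List.enumerate_nil, posOf, PySem.Dict.getD_empty, PySem.Dict.contains_empty]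
  | append_singleton l x ih =>
    obtain ⟨h1, h2, h3, h4, h5⟩ := ih
    set st := (PySem.List.enumerate l 0).foldl Astep (PySem.Dict.empty, []) with hst
    have hfold : (PySem.List.enumerate (l ++ [x]) 0).foldl Astep (PySem.Dict.empty, [])
        = Astep st ((l.length : Int), x) := by
      rw [PySem.List.enumerate_append, List.foldl_append]
      simp [PySem.List.enumerate_cons, PySem.List.enumerate_nil]
      rw [← hst]
    rw [hfold]
    have hcontains : st.1.contains x = l.contains x := h2 x
    -- key stability for chars already repeated
    have hkey : ∀ a, 2 ≤ l.count a →
        PySem.List.pyGetD (posOf (l ++ [x]) a) 1 0 = PySem.List.pyGetD (posOf l a) 1 0 := by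
      intro a ha
      rw [posOf_append_singleton]
      exact pyGetD_one_append _ _ (by rw [length_posOf]; exact ha)
    by_cases hx : x ∈ l
    · have hcx : st.1.contains x = true := by rw [hcontains]; simp [hx]
      by_cases hr : x ∈ st.2
      · -- already repeated: count x l ≥ 2
        have hcnt : 2 ≤ l.count x := (h3 x).mp hr
        refine ⟨fun c => ?_, fun c => ?_, fun c => ?_, ?_, ?_⟩ <;>
          simp only [Astep, hcx, if_true, hr, if_true]
        · rw [PySem.Dict.getD_modify, posOf_append_singleton]
          by_cases hcx2 : c = x
          · subst hcx2; simp [h1]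
          · have hcx3 : ¬x = c := fun h => hcx2 h.symm
            simp [hcx2, hcx3, h1]
        · rw [PySem.Dict.contains_modify, h2]
          by_cases hxc : c = x <;> simp [hxc]
        · rw [h3, List.count_append]
          by_cases hce : x = c
          · have h2c : 2 ≤ List.count c l := hce ▸ hcnt
            simp [hce]
            exact iff_of_true h2c (hce ▸ hx)
          · simp [hce]
        · exact h4
        · refine h5.imp_of_mem ?_
          intro a b hma hmb hab
          rw [hkey a ((h3 a).mp hma), hkey b ((h3 b).mp hmb)]
          exact hab
      · -- second occurrence now: count x l = 1
        have hcnt1 : l.count x = 1 := by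
          have := (h3 x).not.mp hr
          have hge : 1 ≤ l.count x := List.one_le_count_iff.mpr hx
          omega
        refine ⟨fun c => ?_, fun c => ?_, fun c => ?_, ?_, ?_⟩ <;>
          simp only [Astep, hcx, if_true, hr, if_false]
        · rw [PySem.Dict.getD_modify, posOf_append_singleton]
          by_cases hcx2 : c = x
          · subst hcx2; simp [h1]
          · have hcx3 : ¬x = c := fun h => hcx2 h.symm
            simp [hcx2, hcx3, h1]
        · rw [PySem.Dict.contains_modify, h2]
          by_cases hxc : c = x <;> simp [hxc]
        · rw [List.mem_append, h3, List.count_append]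
          by_cases hce : x = c
          · have h1c : List.count c l = 1 := hce ▸ hcnt1
            simp [hce, h1c]
          · have hec : ¬c = x := fun h => hce h.symm
            simp [hce, hec]
        · exact h4.append (by simp) (by intro a ha hb; simp at hb; subst hb; exact hr ha)
        · rw [List.pairwise_append]
          refine ⟨h5.imp_of_mem ?_, by simp, ?_⟩
          · intro a b hma hmb hab
            rw [hkey a ((h3 a).mp hma), hkey b ((h3 b).mp hmb)]
            exact hab
          · intro a hma b hmb
            rw [List.mem_singleton] at hmb
            rw [hmb]
            have hca : 2 ≤ l.count a := (h3 a).mp hma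
            rw [hkey a hca]
            -- key of x in l++[x] is l.length
            have hx1 : (posOf l x).length = 1 := by rw [length_posOf, hcnt1]
            obtain ⟨v, hv⟩ := List.length_eq_one_iff.mp hx1
            have : posOf (l ++ [x]) x = [v, (l.length : Int)] := by
              rw [posOf_append_singleton, hv]; simp
            rw [this]
            have hmem := pyGetD_one_mem (posOf l a) (by rw [length_posOf]; exact hca)
            have := (mem_posOf_lt l a _ hmem).2
            simp at *
            calc PySem.List.pyGetD (posOf l a) 1 0 < (l.length : Int) := this
              _ = PySem.List.pyGetD [v, (l.length : Int)] 1 0 := by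
                    rw [show (1:Int) = ((1:Nat):Int) from rfl, PySem.List.pyGetD_natCast]; rfl
    · -- first occurrence of x
      have hcx : st.1.contains x = false := by
        rw [hcontains]; simp [hx]
      have hcnt0 : l.count x = 0 := List.count_eq_zero.mpr hx
      refine ⟨fun c => ?_, fun c => ?_, fun c => ?_, ?_, ?_⟩ <;>
        simp only [Astep, hcx, if_false, Bool.false_eq_true]
      · rw [PySem.Dict.getD_insert, posOf_append_singleton]
        by_cases hcx2 : c = x
        · subst hcx2
          have : posOf l c = [] := by
            have := length_posOf l c
            rw [hcnt0] at this
            exact List.length_eq_zero_iff.mp this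
          simp [this]
        · have hcx3 : ¬x = c := fun h => hcx2 h.symm
          simp [hcx2, hcx3, h1]
      · rw [PySem.Dict.contains_insert, h2]
        by_cases hxc : c = x <;> simp [hxc]
      · rw [h3, List.count_append]
        by_cases hce : x = c
        · have h0 : List.count c l = 0 := hce ▸ hcnt0
          simp [hce, h0]
        · simp [hce]
      · exact h4
      · refine h5.imp_of_mem ?_
        intro a b hma hmb hab
        rw [hkey a ((h3 a).mp hma), hkey b ((h3 b).mp hmb)]
        exact hab

theorem B_getD (l : List Char) (c : Char) :
    ((PySem.List.enumerate l 0).foldl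
      (fun (d : PySem.Dict Char (List Int)) ic => d.modify ic.2 [] (fun v => v ++ [ic.1]))
      PySem.Dict.empty).getD c [] = posOf l c := by
  have hfold : (PySem.List.enumerate l 0).foldl
      (fun (d : PySem.Dict Char (List Int)) ic => d.modify ic.2 [] (fun v => v ++ [ic.1]))
      PySem.Dict.empty
    = ((PySem.List.enumerate l 0).map (fun ic => (ic.2, ic.1))).foldl
      (fun (d : PySem.Dict Char (List Int)) p => d.modify p.1 [] (fun v => v ++ [p.2]))
      PySem.Dict.empty := by
    rw [List.foldl_map]
  rw [hfold, PySem.Dict.getD_foldl_modify_append]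
  simp only [PySem.Dict.getD_empty, List.nil_append]
  unfold posOf
  rw [List.filter_map, List.map_map]
  rfl

theorem B_keys (l : List Char) :
    ((PySem.List.enumerate l 0).foldl
      (fun (d : PySem.Dict Char (List Int)) ic => d.modify ic.2 [] (fun v => v ++ [ic.1]))
      PySem.Dict.empty).keys = PySem.Set.ofList l := by
  rw [PySem.Dict.keys_foldl_modify_key (PySem.List.enumerate l 0) (fun ic => ic.2) []
      (fun _ ic => fun v => v ++ [ic.1]) PySem.Dict.empty]
  rw [PySem.List.map_snd_enumerate, PySem.Set.ofList_eq_foldl]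
  rfl

theorem B_nodup_keys (l : List Char) :
    ((PySem.List.enumerate l 0).foldl
      (fun (d : PySem.Dict Char (List Int)) ic => d.modify ic.2 [] (fun v => v ++ [ic.1]))
      PySem.Dict.empty).keys.Nodup := by
  exact PySem.Dict.nodup_keys_foldl_modify_key (PySem.List.enumerate l 0) (fun ic => ic.2) []
      (fun _ ic => fun v => v ++ [ic.1]) PySem.Dict.empty PySem.Dict.nodup_keys_empty

theorem main (string : String) : check_repeated_chars string = check_repeated_chars_alt string := by
  obtain ⟨h1, h2, h3, h4, h5⟩ := A_inv string.toList
  set l := string.toList with hl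
  set st := (PySem.List.enumerate l 0).foldl Astep (PySem.Dict.empty, []) with hst
  have hA : check_repeated_chars string = st.2.map (fun c => st.1.getD c []) := rfl
  set Bd := (PySem.List.enumerate l 0).foldl
      (fun (d : PySem.Dict Char (List Int)) ic => d.modify ic.2 [] (fun v => v ++ [ic.1]))
      PySem.Dict.empty with hBd
  have hB : check_repeated_chars_alt string
      = PySem.List.sorted (Bd.values.filter (fun p => decide (2 ≤ PySem.List.len p)))
          (fun p => PySem.List.pyGetD p 1 0) false := rfl
  rw [hA, hB]
  -- rewrite A's output as a map of posOf
  have hAmap : st.2.map (fun c => st.1.getD c []) = st.2.map (fun c => posOf l c) := by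
    exact List.map_congr_left (fun c _ => h1 c)
  rw [hAmap]
  -- rewrite B's repeats
  have hvals : Bd.values = (PySem.Set.ofList l).map (fun c => posOf l c) := by
    rw [PySem.Dict.values_eq_map_keys Bd (B_nodup_keys l) [], B_keys l]
    exact List.map_congr_left (fun c _ => B_getD l c)
  have hfilter : Bd.values.filter (fun p => decide (2 ≤ PySem.List.len p))
      = ((PySem.Set.ofList l).filter (fun c => decide (2 ≤ (l.count c)))).map (fun c => posOf l c) := by
    rw [hvals, List.filter_map]
    congr 1
    apply List.filter_congr
    intro c _
    simp [Function.comp, PySem.List.len_eq, length_posOf]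
  rw [hfilter]
  -- the sort characterisation
  have hperm : (st.2.map (fun c => posOf l c)).Perm
      (((PySem.Set.ofList l).filter (fun c => decide (2 ≤ l.count c))).map (fun c => posOf l c)) := by
    apply List.Perm.map
    rw [List.perm_ext_iff_of_nodup h4 ((PySem.Set.nodup_ofList l).filter _)]
    intro c
    rw [h3 c, List.mem_filter, PySem.Set.mem_ofList]
    constructor
    · intro h
      refine ⟨List.one_le_count_iff.mp (by omega), by simpa using h⟩
    · intro ⟨_, h⟩
      simpa using h
  have hpair : (st.2.map (fun c => posOf l c)).Pairwise
      (fun a b => PySem.List.pyGetD a 1 0 < PySem.List.pyGetD b 1 0) := by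
    rw [List.pairwise_map]
    exact h5
  exact (PySem.List.sorted_eq_of_perm_of_pairwise_lt _ _ (fun p => PySem.List.pyGetD p 1 0) hperm hpair).symm

-- ===== VERDICT (by name: the statement is the Claim_ definition above) =====
theorem check_repeated_chars_spec : Claim_equal_check_repeated_chars := by
  intro string _
  unfold Spec_check_repeated_chars
  exact main string
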